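-- pv_equiv track=rewrite | github.com/sleep-falcon/CSCI576-project-2023 | backend/detect_scene_v2_1.py | frames_range
-- ===== SOURCE A (Python) =====
-- def frames_range(cuts, start_frame, end_frame):
--     l = len(cuts)
--     res = []
--     prev_cut = 0
--     if l == 0:
--         res.append([start_frame, end_frame])
--     if l == 1:
--         cut = cuts[0]
--         res.append([start_frame, cut])
--         res.append([cut, end_frame])
--     else:
--         for idx, cut in enumerate(cuts):
--             if (idx == 0):
--                 res.append([start_frame, cut])
--             elif (idx == l - 1):
--                 res.append([prev_cut, cut])
--                 res.append([cut, end_frame])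
--             else:
--                 res.append([prev_cut, cut])
--             prev_cut = cut
--     return res
-- ===== SOURCE B (Python) =====
-- def frames_range(cuts, start_frame, end_frame):
--     bounds = [start_frame] + list(cuts) + [end_frame]
--     return [[a, b] for a, b in zip(bounds, bounds[1:])]
-- ===== Notes on version B (the rewrite author's own statement) =====
-- stated objective: simpler
-- what changed: Builds the boundary list [start_frame]+cuts+[end_frame] once and pairs consecutive elements via zip, removing all idx==0 / idx==l-1 special cases and the prev_cut accumulator.
import Mathlib
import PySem

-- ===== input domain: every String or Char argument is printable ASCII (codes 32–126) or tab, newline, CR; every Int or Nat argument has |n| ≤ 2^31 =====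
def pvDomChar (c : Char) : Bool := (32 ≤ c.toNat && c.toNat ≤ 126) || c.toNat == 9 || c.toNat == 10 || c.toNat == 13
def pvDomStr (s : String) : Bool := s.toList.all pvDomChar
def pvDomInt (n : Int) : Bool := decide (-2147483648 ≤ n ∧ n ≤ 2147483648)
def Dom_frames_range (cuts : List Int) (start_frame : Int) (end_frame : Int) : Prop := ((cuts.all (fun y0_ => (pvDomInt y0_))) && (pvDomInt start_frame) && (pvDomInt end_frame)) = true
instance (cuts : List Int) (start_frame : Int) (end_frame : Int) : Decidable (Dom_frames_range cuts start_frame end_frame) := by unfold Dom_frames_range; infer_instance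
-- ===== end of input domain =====

-- B builds the boundary list [start_frame]+cuts+[end_frame] once and pairs consecutive
-- elements, replacing A's idx==0 / idx==l-1 special cases and prev_cut accumulator (simpler).

-- ===== PORT A =====
def frames_range (cuts : List Int) (start_frame : Int) (end_frame : Int) : List (List Int) :=
  let l : Int := (cuts.length : Int)
  let res : List (List Int) := []
  let res := if l = 0 then res ++ [[start_frame, end_frame]] else res
  if l = 1 then
    -- cuts[0]: the branch guarantees cuts is nonempty, so headD is exact here
    let cut := cuts.headD 0
    res ++ [[start_frame, cut], [cut, end_frame]]
  else
    ((PySem.List.enumerate cuts 0).foldl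
      (fun (st : List (List Int) × Int) (p : Int × Int) =>
        let res := st.1
        let prev_cut := st.2
        let idx := p.1
        let cut := p.2
        let res :=
          if idx = 0 then res ++ [[start_frame, cut]]
          else if idx = l - 1 then res ++ [[prev_cut, cut], [cut, end_frame]]
          else res ++ [[prev_cut, cut]]
        (res, cut)) (res, 0)).1

-- ===== PORT B =====
def frames_range_alt (cuts : List Int) (start_frame : Int) (end_frame : Int) : List (List Int) :=
  let bounds := [start_frame] ++ cuts ++ [end_frame]
  (bounds.zip bounds.tail).map (fun p => [p.1, p.2])

-- ===== PRECONDITION & SPEC =====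
def Spec_frames_range (cuts : List Int) (start_frame : Int) (end_frame : Int) (out : List (List Int)) : Prop := out = frames_range_alt cuts start_frame end_frame
instance (cuts : List Int) (start_frame : Int) (end_frame : Int) (out : List (List Int)) : Decidable (Spec_frames_range cuts start_frame end_frame out) := by unfold Spec_frames_range; infer_instance

-- ===== CLAIM (what is proved, stated in full; the proofs are below) =====
def Claim_equal_frames_range : Prop := ∀ (cuts : List Int) (start_frame : Int) (end_frame : Int), Dom_frames_range cuts start_frame end_frame → Spec_frames_range cuts start_frame end_frame (frames_range cuts start_frame end_frame)

-- ===== LEMMAS AND PROOFS =====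

-- consecutive pairs of (prev :: rest): [[prev, rest₀], [rest₀, rest₁], …]
def pvPz (prev : Int) : List Int → List (List Int)
  | [] => []
  | x :: t => [prev, x] :: pvPz x t

theorem pvPz_zip (prev : Int) (rest : List Int) :
    ((prev :: rest).zip rest).map (fun p => [p.1, p.2]) = pvPz prev rest := by
  induction rest generalizing prev with
  | nil => rfl
  | cons x t ih => simp [pvPz, List.zip_cons_cons, ih x]

theorem pvFold_lem (s e l : Int) (xs : List Int) :
    ∀ (i : Int) (prev : Int) (res : List (List Int)), xs ≠ [] → 1 ≤ i →
      i + (xs.length : Int) = l →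
      ((PySem.List.enumerate xs i).foldl
        (fun (st : List (List Int) × Int) (p : Int × Int) =>
          let res := st.1
          let prev_cut := st.2
          let idx := p.1
          let cut := p.2
          let res :=
            if idx = 0 then res ++ [[s, cut]]
            else if idx = l - 1 then res ++ [[prev_cut, cut], [cut, e]]
            else res ++ [[prev_cut, cut]]
          (res, cut)) (res, prev)).1 = res ++ pvPz prev (xs ++ [e]) := by
  induction xs with
  | nil => intro _ _ _ h; exact absurd rfl h
  | cons x t ih =>
    intro i prev res _ hi hl
    cases t with
    | nil =>
      have h0 : ¬ i = 0 := by omega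
      have h1 : i = l - 1 := by simp at hl; omega
      simp [PySem.List.enumerate_cons, PySem.List.enumerate_nil, h1, pvPz]
      omega
    | cons y t' =>
      have h0 : ¬ i = 0 := by omega
      have h1 : ¬ i = l - 1 := by simp at hl ⊢; omega
      have hl' : (i + 1) + ((y :: t').length : Int) = l := by simp at hl ⊢; omega
      rw [PySem.List.enumerate_cons]
      simp only [List.foldl_cons, h0, h1, if_false]
      rw [ih (i + 1) x (res ++ [[prev, x]]) (by simp) (by omega) hl']
      simp [pvPz]

theorem frames_range_spec : Claim_equal_frames_range := by
  intro cuts s e _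
  show frames_range cuts s e = frames_range_alt cuts s e
  have hB : frames_range_alt cuts s e = pvPz s (cuts ++ [e]) := by
    unfold frames_range_alt
    simpa using pvPz_zip s (cuts ++ [e])
  match cuts with
  | [] =>
    simp [frames_range, hB, PySem.List.enumerate_nil, pvPz]
  | [c] =>
    simp [frames_range, hB, pvPz]
  | c :: y :: t =>
    rw [hB]
    unfold frames_range
    have hl0 : ¬ ((c :: y :: t).length : Int) = 0 := by simp; omega
    have hl1 : ¬ ((c :: y :: t).length : Int) = 1 := by simp; omega
    simp only [hl0, hl1, if_false]
    rw [PySem.List.enumerate_cons]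
    simp only [List.foldl_cons, if_true, zero_add]
    have := pvFold_lem s e ((c :: y :: t).length : Int) (y :: t) 1 c [[s, c]]
      (by simp) (by omega) (by simp; omega)
    simp only [List.nil_append] at this ⊢
    rw [this]
    simp [pvPz]
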